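-- pv_equiv track=rewrite | github.com/tasnimAlam/dot-files | .config/hamr/plugins/default-apps/handler.py | build_app_lookup
-- ===== SOURCE A (Python) =====
-- def build_app_lookup(apps):
--     lookup = {}
--     for app in apps:
--         desktop_file = app.get("desktop_file")
--         if desktop_file and desktop_file not in lookup:
--             lookup[desktop_file] = app
--         desktop_id = app.get("desktop_id")
--         if desktop_id and desktop_id not in lookup:
--             lookup[desktop_id] = app
--     return lookup
-- ===== SOURCE B (Python) =====
-- def build_app_lookup(apps):
--     # Flatten to a (key, app) stream, resolve first-wins by last-write over the
--     # reversed stream, then emit keys in first-occurrence order.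
--     pairs = [(k, app) for app in apps
--              for k in (app.get("desktop_file"), app.get("desktop_id")) if k]
--     winners = {k: v for k, v in reversed(pairs)}
--     return {k: winners[k] for k in dict.fromkeys(k for k, _ in pairs)}
-- ===== Notes on version B (the rewrite author's own statement) =====
-- stated objective: alternative
-- what changed: Replaces the membership-guarded first-wins insertion loop by a three-stage pipeline: flatten apps to a (key, app) stream, resolve the winning app per key by unconditional last-write over the reversed stream, then rebuild the dict with keys in first-occurrence order via dict.fromkeys.
import Mathlib
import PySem

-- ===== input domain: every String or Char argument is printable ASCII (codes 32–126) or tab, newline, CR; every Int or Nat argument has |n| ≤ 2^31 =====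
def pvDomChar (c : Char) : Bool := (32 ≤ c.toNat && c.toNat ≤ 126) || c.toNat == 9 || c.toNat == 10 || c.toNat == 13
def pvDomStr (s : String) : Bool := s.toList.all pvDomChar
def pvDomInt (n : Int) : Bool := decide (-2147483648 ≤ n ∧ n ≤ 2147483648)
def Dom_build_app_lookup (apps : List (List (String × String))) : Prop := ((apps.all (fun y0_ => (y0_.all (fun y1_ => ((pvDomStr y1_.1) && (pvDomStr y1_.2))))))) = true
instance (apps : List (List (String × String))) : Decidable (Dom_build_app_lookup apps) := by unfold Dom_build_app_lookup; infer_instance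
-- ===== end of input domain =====

-- B replaces the guarded first-wins insertion loop by a flatten / reverse-overwrite /
-- reorder pipeline (no membership check); objective: alternative, same result and order.

-- ===== PORT A =====
-- loop body of A's 'for app in apps', kept as a named helper
def pvStepA (lookup : PySem.Dict String (List (String × String))) (app : List (String × String)) :
    PySem.Dict String (List (String × String)) :=
  let desktop_file := (PySem.Dict.mk app).get? "desktop_file"
  let lookup :=
    match desktop_file with
    | some df => if df != "" && !(lookup.contains df) then lookup.insert df app else lookup
    | none => lookup
  let desktop_id := (PySem.Dict.mk app).get? "desktop_id"
  match desktop_id with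
  | some di => if di != "" && !(lookup.contains di) then lookup.insert di app else lookup
  | none => lookup

def build_app_lookup (apps : List (List (String × String))) : List (String × List (String × String)) :=
  (apps.foldl pvStepA PySem.Dict.empty).items

-- ===== PORT B =====
def build_app_lookup_alt (apps : List (List (String × String))) : List (String × List (String × String)) :=
  let pairs := apps.flatMap (fun app =>
    [(PySem.Dict.mk app).get? "desktop_file", (PySem.Dict.mk app).get? "desktop_id"].filterMap
      (fun o => match o with
        | some k => if k != "" then some (k, app) else none
        | none => none))
  let winners := pairs.reverse.foldl (fun d p => d.insert p.1 p.2) PySem.Dict.empty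
  -- winners[k]: the key is always present (k comes from pairs), so getD's default is never used
  let keys := PySem.List.dedup (pairs.map (·.1))
  (keys.foldl (fun d k => d.insert k (winners.getD k [])) PySem.Dict.empty).items

-- ===== PRECONDITION & SPEC =====
def Spec_build_app_lookup (apps : List (List (String × String))) (out : List (String × List (String × String))) : Prop := out = build_app_lookup_alt apps
instance (apps : List (List (String × String))) (out : List (String × List (String × String))) : Decidable (Spec_build_app_lookup apps out) := by unfold Spec_build_app_lookup; infer_instance

-- ===== CLAIM (what is proved, stated in full; the proofs are below) =====
def Claim_equal_build_app_lookup : Prop := ∀ (apps : List (List (String × String))), Dom_build_app_lookup apps → Spec_build_app_lookup apps (build_app_lookup apps)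

-- ===== LEMMAS AND PROOFS =====

-- the truthy (key, app) pairs contributed by one app, in A's probe order
def pvKeyPairs (app : List (String × String)) : List (String × List (String × String)) :=
  [(PySem.Dict.mk app).get? "desktop_file", (PySem.Dict.mk app).get? "desktop_id"].filterMap
    (fun o => match o with
      | some k => if k != "" then some (k, app) else none
      | none => none)

-- one guarded (first-wins) insertion step
def pvStepG (d : PySem.Dict String (List (String × String))) (p : String × List (String × String)) :
    PySem.Dict String (List (String × String)) :=
  if d.contains p.1 then d else d.insert p.1 p.2

theorem pvStepA_eq_foldG (d : PySem.Dict String (List (String × String))) (app : List (String × String)) :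
    pvStepA d app = (pvKeyPairs app).foldl pvStepG d := by
  unfold pvStepA pvKeyPairs
  rcases (PySem.Dict.mk app).get? "desktop_file" with _ | df <;>
    rcases (PySem.Dict.mk app).get? "desktop_id" with _ | di
  · rfl
  · by_cases h : di = "" <;> simp [List.filterMap, pvStepG, h] <;> split_ifs <;> simp_all
  · by_cases h : df = "" <;> simp [List.filterMap, pvStepG, h] <;> split_ifs <;> simp_all
  · by_cases h1 : df = "" <;> by_cases h2 : di = "" <;>
      simp [List.filterMap, pvStepG, h1, h2] <;> split_ifs <;> simp_all

theorem pvFoldA_eq_foldG (apps : List (List (String × String))) (d : PySem.Dict String (List (String × String))) :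
    apps.foldl pvStepA d = (apps.flatMap pvKeyPairs).foldl pvStepG d := by
  induction apps generalizing d with
  | nil => rfl
  | cons a t ih => simp [List.foldl_append, ih, pvStepA_eq_foldG]

theorem pvFoldG_get? (L : List (String × List (String × String)))
    (d : PySem.Dict String (List (String × String))) (x : String) :
    (L.foldl pvStepG d).get? x = (d.get? x).or ((PySem.Dict.mk L).get? x) := by
  induction L generalizing d with
  | nil => cases h : d.get? x <;> simp [h] <;> rfl
  | cons p t ih =>
    obtain ⟨k, v⟩ := p
    simp only [List.foldl, ih, pvStepG, PySem.Dict.get?_mk_cons]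
    by_cases hc : d.contains k = true
    · have hs := hc; rw [PySem.Dict.contains_eq_isSome_get?] at hs
      rcases hk : d.get? k with _ | w
      · simp [hk] at hs
      · by_cases hx : x = k
        · subst hx; simp [hc, hk]
        · simp [hc, show (k == x) = false by simpa using Ne.symm hx]
    · have hs := hc; rw [PySem.Dict.contains_eq_isSome_get?] at hs
      have hk : d.get? k = none := by
        rcases hk : d.get? k with _ | w
        · rfl
        · simp [hk] at hs
      rw [if_neg hc, PySem.Dict.get?_insert]
      by_cases hx : x = k
      · subst hx; simp [hk]
      · simp [hx, show (k == x) = false by simpa using Ne.symm hx]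

theorem pvFoldG_keys (L : List (String × List (String × String)))
    (d : PySem.Dict String (List (String × String))) :
    (L.foldl pvStepG d).keys = PySem.Set.update d.keys (L.map (·.1)) := by
  induction L generalizing d with
  | nil => rfl
  | cons p t ih =>
    simp only [List.foldl, List.map, ih, pvStepG, PySem.Set.update_cons]
    by_cases hc : d.contains p.1 = true
    · have : PySem.Set.add d.keys p.1 = d.keys := by
        simp [PySem.Set.add, (PySem.Dict.contains_iff_mem_keys d p.1).1 hc]
      simp [hc, this]
    · have hk : (d.insert p.1 p.2).keys = d.keys ++ [p.1] :=
        PySem.Dict.keys_insert_of_not_contains d p.2 (by simpa using hc)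
      have : PySem.Set.add d.keys p.1 = d.keys ++ [p.1] := by
        simp [PySem.Set.add]
        intro h
        exact absurd ((PySem.Dict.contains_iff_mem_keys d p.1).2 h) (by simpa using hc)
      simp [hc, hk, this]

theorem pvWinners_get? (L : List (String × List (String × String))) (x : String) :
    (L.reverse.foldl (fun d p => d.insert p.1 p.2) PySem.Dict.empty).get? x
      = (PySem.Dict.mk L).get? x := by
  induction L with
  | nil => rfl
  | cons p t ih =>
    obtain ⟨k, v⟩ := p
    simp only [List.reverse_cons, List.foldl_append, List.foldl]
    rw [PySem.Dict.get?_insert, PySem.Dict.get?_mk_cons]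
    by_cases hx : x = k
    · subst hx; simp
    · rw [if_neg hx, ih]
      simp [show (k == x) = false by simpa using Ne.symm hx]

theorem build_app_lookup_eq (apps : List (List (String × String))) :
    build_app_lookup apps = build_app_lookup_alt apps := by
  unfold build_app_lookup build_app_lookup_alt
  dsimp only
  set L := apps.flatMap pvKeyPairs with hL
  have hBpairs : (apps.flatMap (fun app =>
      [(PySem.Dict.mk app).get? "desktop_file", (PySem.Dict.mk app).get? "desktop_id"].filterMap
        (fun o => match o with
          | some k => if k != "" then some (k, app) else none
          | none => none))) = L := rfl
  rw [hBpairs, pvFoldA_eq_foldG]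
  -- A side: items of the guarded fold
  have hkeys : (L.foldl pvStepG PySem.Dict.empty).keys = PySem.Set.ofList (L.map (·.1)) := by
    rw [pvFoldG_keys]
    simpa [PySem.Dict.keys_empty] using PySem.Set.update_nil_left (L.map (·.1))
  have hnd : (L.foldl pvStepG PySem.Dict.empty).keys.Nodup := by
    rw [hkeys]; exact PySem.Set.nodup_ofList _
  rw [PySem.Dict.items_eq_map_keys _ hnd [], hkeys]
  -- B side: fold over fresh distinct keys appends
  have hdd : PySem.List.dedup (L.map (·.1)) = PySem.Set.ofList (L.map (·.1)) := rfl
  rw [hdd, PySem.Dict.items_foldl_insert_fresh _ (fun k => k) _ _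
        (fun a _ => PySem.Dict.contains_empty a)
        (by simpa using PySem.Set.nodup_ofList (L.map (·.1)))]
  have hie : (PySem.Dict.empty : PySem.Dict String (List (String × String))).items = [] := rfl
  rw [hie, List.nil_append]
  apply List.map_congr_left
  intro k _
  rw [PySem.Dict.getD_eq_get?_getD, PySem.Dict.getD_eq_get?_getD, pvFoldG_get?,
      pvWinners_get?, PySem.Dict.get?_empty, Option.none_or]

-- ===== VERDICT (by name: the statement is the Claim_ definition above) =====
theorem build_app_lookup_spec : Claim_equal_build_app_lookup := by
  intro apps _
  unfold Spec_build_app_lookup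
  exact build_app_lookup_eq apps
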